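-- pv_equiv track=rewrite | github.com/Tanushree200/DermaMatch-Skincare-Recommendation-System | skincare/skincare_recommendation.py | generate_skincare_routine
-- ===== SOURCE A (Python) =====
-- skincare_ingredient_forms = {
--     "Hyaluronic acid": "serum",
--     "Vitamin C": "serum",
--     "Niacinamide": "serum",
--     "Retinol": "serum",
--     "Glycerin": "moisturizer",
--     "Ceramides": "moisturizer",
--     "Squalane": "moisturizer",
--     "Salicylic acid": "cleanser",
--     "Glycolic acid": "toner",
--     "Tea tree oil": "spot treatment",
--     "Aloe vera": "moisturizer",
--     "Oat extract": "moisturizer",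
--     "Centella asiatica": "moisturizer",
--     "Alpha arbutin": "serum",
--     "Vitamin E": "moisturizer",
--     "Green tea extract": "toner",
--     "Honey": "mask",
--     "Peptides": "serum",
--     "Kojic acid": "serum",
--     "Caffeine": "eye cream",
--     "Collagen": "serum",
--     "Cica": "moisturizer"
-- }
--
-- def generate_skincare_routine(recommendations):
--     skincare_routine = {}
--     for problem, ingredients in recommendations.items():
--         for ingredient in ingredients:
--             form = skincare_ingredient_forms.get(ingredient, "unknown")
--             if form in skincare_routine:
--                 # Check if ingredient is already in the routine for this form
--                 if ingredient not in skincare_routine[form]: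
--                     skincare_routine[form].append(ingredient)
--             else:
--                 skincare_routine[form] = [ingredient]
--     return skincare_routine
-- ===== SOURCE B (Python) =====
-- skincare_ingredient_forms = {
--     "Hyaluronic acid": "serum",
--     "Vitamin C": "serum",
--     "Niacinamide": "serum",
--     "Retinol": "serum",
--     "Glycerin": "moisturizer",
--     "Ceramides": "moisturizer",
--     "Squalane": "moisturizer",
--     "Salicylic acid": "cleanser",
--     "Glycolic acid": "toner",
--     "Tea tree oil": "spot treatment",
--     "Aloe vera": "moisturizer",
--     "Oat extract": "moisturizer",
--     "Centella asiatica": "moisturizer",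
--     "Alpha arbutin": "serum",
--     "Vitamin E": "moisturizer",
--     "Green tea extract": "toner",
--     "Honey": "mask",
--     "Peptides": "serum",
--     "Kojic acid": "serum",
--     "Caffeine": "eye cream",
--     "Collagen": "serum",
--     "Cica": "moisturizer"
-- }
--
--
-- def generate_skincare_routine(recommendations):
--     # Stage 1: unique ingredients in global first-occurrence order.
--     uniq = list(dict.fromkeys(ing for ings in recommendations.values() for ing in ings))
--     # Stage 2: the distinct forms, in order of first appearance.
--     forms = list(dict.fromkeys(skincare_ingredient_forms.get(i, "unknown") for i in uniq))
--     # Stage 3: build each form's list by filtering the unique ingredients —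
--     # no incremental dict mutation, no membership checks.
--     return {f: [i for i in uniq
--                 if skincare_ingredient_forms.get(i, "unknown") == f]
--             for f in forms}
-- ===== Notes on version B (the rewrite author's own statement) =====
-- stated objective: faster
-- what changed: A builds the dict incrementally in one nested pass, scanning the form's current list for each ingredient; B computes three staged values instead -- a global ordered dedup of all ingredients (dict.fromkeys), the distinct forms in first-appearance order, then one filter comprehension per form -- with no incremental dict mutation or membership scans; correct because each ingredient has one fixed form, so global dedup equals per-form dedup and first-occurrence order is preserved.
import Mathlib
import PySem

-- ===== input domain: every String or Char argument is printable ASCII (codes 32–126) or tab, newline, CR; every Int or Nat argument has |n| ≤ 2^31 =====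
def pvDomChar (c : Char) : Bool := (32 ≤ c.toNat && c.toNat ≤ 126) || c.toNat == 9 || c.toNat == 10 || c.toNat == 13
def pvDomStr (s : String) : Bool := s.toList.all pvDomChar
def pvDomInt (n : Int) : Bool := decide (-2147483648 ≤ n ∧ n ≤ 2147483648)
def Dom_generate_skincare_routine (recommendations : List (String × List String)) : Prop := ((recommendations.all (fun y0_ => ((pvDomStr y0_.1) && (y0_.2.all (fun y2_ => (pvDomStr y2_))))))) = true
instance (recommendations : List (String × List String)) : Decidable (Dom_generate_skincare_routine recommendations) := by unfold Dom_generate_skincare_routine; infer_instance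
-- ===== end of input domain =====

-- B replaces A's incremental dict-building pass (with its per-form membership scan) by three
-- staged computations: global ordered dedup, the distinct forms, then one filter per form.
-- shared module constant: the skincare_ingredient_forms dict
def skincare_ingredient_forms : PySem.Dict String String := PySem.Dict.ofList [
  ("Hyaluronic acid", "serum"), ("Vitamin C", "serum"), ("Niacinamide", "serum"),
  ("Retinol", "serum"), ("Glycerin", "moisturizer"), ("Ceramides", "moisturizer"),
  ("Squalane", "moisturizer"), ("Salicylic acid", "cleanser"), ("Glycolic acid", "toner"),
  ("Tea tree oil", "spot treatment"), ("Aloe vera", "moisturizer"), ("Oat extract", "moisturizer"),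
  ("Centella asiatica", "moisturizer"), ("Alpha arbutin", "serum"), ("Vitamin E", "moisturizer"),
  ("Green tea extract", "toner"), ("Honey", "mask"), ("Peptides", "serum"),
  ("Kojic acid", "serum"), ("Caffeine", "eye cream"), ("Collagen", "serum"), ("Cica", "moisturizer")]

-- ===== PORT A =====
def generate_skincare_routine (recommendations : List (String × List String)) : List (String × List String) :=
  (recommendations.foldl (fun skincare_routine pr =>
    pr.2.foldl (fun skincare_routine ingredient =>
      let form := skincare_ingredient_forms.getD ingredient "unknown"
      if skincare_routine.contains form then
        if (skincare_routine.getD form []).contains ingredient then skincare_routine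
        else skincare_routine.modify form [] (fun l => l ++ [ingredient])
      else skincare_routine.insert form [ingredient])
      skincare_routine)
    PySem.Dict.empty).items

-- ===== PORT B =====
def generate_skincare_routine_alt (recommendations : List (String × List String)) : List (String × List String) :=
  let uniq := PySem.List.dedup (recommendations.flatMap (fun pr => pr.2))
  let forms := PySem.List.dedup (uniq.map (fun i => skincare_ingredient_forms.getD i "unknown"))
  forms.map (fun f => (f, uniq.filter (fun i => skincare_ingredient_forms.getD i "unknown" == f)))

-- ===== PRECONDITION & SPEC =====
def Spec_generate_skincare_routine (recommendations : List (String × List String)) (out : List (String × List String)) : Prop := out = generate_skincare_routine_alt recommendations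
instance (recommendations : List (String × List String)) (out : List (String × List String)) : Decidable (Spec_generate_skincare_routine recommendations out) := by unfold Spec_generate_skincare_routine; infer_instance

-- ===== CLAIM =====
def Claim_equal_generate_skincare_routine : Prop := ∀ (recommendations : List (String × List String)), Dom_generate_skincare_routine recommendations → Spec_generate_skincare_routine recommendations (generate_skincare_routine recommendations)

-- ===== LEMMAS AND PROOFS =====

-- A's inner loop body, and the ideal "just append" grouping step it performs on deduplicated input
def pvStepA (d : PySem.Dict String (List String)) (x : String) : PySem.Dict String (List String) :=
  let form := skincare_ingredient_forms.getD x "unknown"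
  if d.contains form then
    if (d.getD form []).contains x then d
    else d.modify form [] (fun l => l ++ [x])
  else d.insert form [x]

def pvStepB (d : PySem.Dict String (List String)) (x : String) : PySem.Dict String (List String) :=
  d.modify (skincare_ingredient_forms.getD x "unknown") [] (fun l => l ++ [x])

-- dedup relative to an already-seen list, in the accumulator style of Set.ofList
def pvFdd (seen : List String) : List String → List String
  | [] => []
  | x :: t => if x ∈ seen then pvFdd seen t else x :: pvFdd (seen ++ [x]) t

lemma pvOfList_acc (xs : List String) : ∀ (s : List String),
    List.foldl PySem.Set.add s xs = s ++ pvFdd s xs := by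
  induction xs with
  | nil => intro s; simp [pvFdd]
  | cons x t ih =>
    intro s
    by_cases h : x ∈ s
    · simp [List.foldl, PySem.Set.add, h, pvFdd, ih]
    · simp only [List.foldl, PySem.Set.add, pvFdd]
      have hc : PySem.Set.contains s x = false := by simp [PySem.Set.contains, h]
      rw [hc]
      simp only [Bool.false_eq_true, if_false, if_neg h, ih]
      simp

lemma pvDedup_eq_fdd (xs : List String) : PySem.List.dedup xs = pvFdd [] xs := by
  have := pvOfList_acc xs []
  simpa [PySem.List.dedup, PySem.Set.ofList, PySem.Set.empty] using this

lemma pvStepA_eq_stepB (d : PySem.Dict String (List String)) (x : String)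
    (hx : x ∉ d.getD (skincare_ingredient_forms.getD x "unknown") []) :
    pvStepA d x = pvStepB d x := by
  unfold pvStepA pvStepB
  by_cases hc : d.contains (skincare_ingredient_forms.getD x "unknown") = true
  · have hmem : ((d.getD (skincare_ingredient_forms.getD x "unknown") []).contains x) = false := by
      simpa using hx
    simp only [hc, if_true, hmem, Bool.false_eq_true, if_false]
  · simp only [hc, Bool.false_eq_true, if_false]
    have h0 : d.getD (skincare_ingredient_forms.getD x "unknown") [] = [] :=
      PySem.Dict.getD_of_not_contains d [] (by simpa using hc)
    simp [PySem.Dict.modify, h0]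

lemma pvMain (xs : List String) : ∀ (seen : List String) (d : PySem.Dict String (List String)),
    (∀ y : String, y ∈ d.getD (skincare_ingredient_forms.getD y "unknown") [] ↔ y ∈ seen) →
    xs.foldl pvStepA d = (pvFdd seen xs).foldl pvStepB d := by
  induction xs with
  | nil => intro seen d _; simp [pvFdd]
  | cons x t ih =>
    intro seen d hinv
    by_cases hs : x ∈ seen
    · have hx : x ∈ d.getD (skincare_ingredient_forms.getD x "unknown") [] := (hinv x).2 hs
      have hc : d.contains (skincare_ingredient_forms.getD x "unknown") = true := by
        by_contra hc'
        have : d.getD (skincare_ingredient_forms.getD x "unknown") [] = [] :=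
          PySem.Dict.getD_of_not_contains d [] (by simpa using hc')
        rw [this] at hx; simp at hx
      have hm : ((d.getD (skincare_ingredient_forms.getD x "unknown") []).contains x) = true := by
        simpa using hx
      have hstep : pvStepA d x = d := by
        unfold pvStepA
        simp only [hc, if_true, hm]
      simp only [List.foldl, hstep, pvFdd, if_pos hs]
      exact ih seen d hinv
    · have hx : x ∉ d.getD (skincare_ingredient_forms.getD x "unknown") [] := fun h => hs ((hinv x).1 h)
      simp only [List.foldl, pvFdd, if_neg hs]
      rw [pvStepA_eq_stepB d x hx]
      apply ih (seen ++ [x])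
      intro y
      unfold pvStepB
      rw [PySem.Dict.getD_modify]
      by_cases hf : skincare_ingredient_forms.getD y "unknown" = skincare_ingredient_forms.getD x "unknown"
      · rw [if_pos hf]
        constructor
        · intro hy
          rcases List.mem_append.1 hy with hy | hy
          · exact List.mem_append.2 (Or.inl ((hinv y).1 (hf ▸ hy)))
          · simp at hy; simp [hy]
        · intro hy
          rcases List.mem_append.1 hy with hy | hy
          · exact List.mem_append.2 (Or.inl (hf ▸ ((hinv y).2 hy)))
          · simp at hy; subst hy; simp
      · rw [if_neg hf]
        rw [hinv y]
        constructor
        · intro hy; exact List.mem_append.2 (Or.inl hy)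
        · intro hy
          rcases List.mem_append.1 hy with hy | hy
          · exact hy
          · simp at hy; subst hy; exact absurd rfl hf

lemma pvFoldl_flatMap (l : List (String × List String)) :
    ∀ (d : PySem.Dict String (List String)),
    l.foldl (fun d pr => pr.2.foldl pvStepA d) d = (l.flatMap (fun pr => pr.2)).foldl pvStepA d := by
  induction l with
  | nil => intro d; simp
  | cons p t ih => intro d; simp [List.foldl_append, ih]

-- a Nodup-keyed dict's items are its keys paired with their getD values
lemma pvItems_eq_keys_map (d : PySem.Dict String (List String)) (h : d.keys.Nodup) :
    d.items = d.keys.map (fun k => (k, d.getD k [])) := by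
  have : d.keys.map (fun k => (k, d.getD k [])) = d.items.map (fun p => (p.1, d.getD p.1 [])) := by
    simp only [PySem.Dict.keys, List.map_map]; rfl
  rw [this]
  conv_lhs => rw [← List.map_id d.items]
  apply List.map_congr_left
  intro p hp
  have hpv : (p.1, p.2) ∈ d.items := by simpa using hp
  have := PySem.Dict.getD_of_mem_items (d := d) (d0 := []) hpv h
  simp [this]

-- the B grouping fold on the deduplicated list: keys and values characterised
lemma pvGroup_items (us : List String) :
    (us.foldl pvStepB PySem.Dict.empty).items
      = (PySem.List.dedup (us.map (fun i => skincare_ingredient_forms.getD i "unknown"))).map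
          (fun f => (f, us.filter (fun i => skincare_ingredient_forms.getD i "unknown" == f))) := by
  set form : String → String := fun i => skincare_ingredient_forms.getD i "unknown" with hform
  set D := us.foldl pvStepB PySem.Dict.empty with hD
  have hkeys : D.keys = PySem.List.dedup (us.map form) := by
    rw [hD]
    show (us.foldl (fun d x => d.modify (form x) [] (fun l => l ++ [x])) PySem.Dict.empty).keys
        = PySem.List.dedup (us.map form)
    rw [PySem.Dict.keys_foldl_modify_key]
    simp [PySem.Dict.keys_empty, PySem.Set.update, PySem.Set.ofList_eq_foldl, PySem.List.dedup_eq_ofList]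
  have hnodup : D.keys.Nodup := by
    rw [hkeys]; exact PySem.List.nodup_dedup _
  have hget : ∀ c : String, D.getD c [] = us.filter (fun i => form i == c) := by
    intro c
    have hmapfold : D = (us.map (fun x => (form x, x))).foldl
        (fun d p => d.modify p.1 [] (fun l => l ++ [p.2])) PySem.Dict.empty := by
      rw [hD, List.foldl_map]; rfl
    rw [hmapfold, PySem.Dict.getD_foldl_modify_append]
    simp only [PySem.Dict.getD_empty, List.filter_map, List.nil_append, List.map_map]
    simp [Function.comp_def]
  rw [pvItems_eq_keys_map D hnodup, hkeys]
  apply List.map_congr_left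
  intro f _
  rw [hget f]

-- ===== VERDICT =====
theorem generate_skincare_routine_spec : Claim_equal_generate_skincare_routine := by
  intro recommendations _
  show generate_skincare_routine recommendations = generate_skincare_routine_alt recommendations
  have hA : generate_skincare_routine recommendations
      = (recommendations.foldl (fun d pr => pr.2.foldl pvStepA d) PySem.Dict.empty).items := rfl
  rw [hA, pvFoldl_flatMap]
  have hinv : ∀ y : String,
      y ∈ (PySem.Dict.empty : PySem.Dict String (List String)).getD (skincare_ingredient_forms.getD y "unknown") [] ↔ y ∈ ([] : List String) := by
    intro y; simp [PySem.Dict.empty, PySem.Dict.getD, PySem.Dict.get?]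
  rw [pvMain _ [] PySem.Dict.empty hinv, ← pvDedup_eq_fdd]
  exact pvGroup_items _
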